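-- pv_equiv track=rewrite | github.com/Carennnnn/leetspeak-translator | leetspeak-translator.py | re_phrases
-- ===== SOURCE A (Python) =====
-- def re_phrases(up_out):
--     ph_out = up_out
--     #define 4 phrases to be replaced
--     btw = "BY THE WAY"
--     lol = "LAUGHING OUT LOUD"
--     omg = "OH MY GOD"
--     asap = "AS SOON AS POSSIBLE"
--
--     #if each phrase in the string to be translated, replace it
--     for x in range(len(up_out)):
--
--         if btw in ph_out:
--             btw_i = ph_out.index(btw)
--             ph_out = ph_out[:btw_i] + "BTW" + ph_out[len(btw)+btw_i:]
--         elif lol in ph_out: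
--             lol_i = ph_out.index(lol)
--             ph_out = ph_out[:lol_i] + "LOL" + ph_out[len(lol)+lol_i:]
--         elif omg in ph_out:
--             omg_i = ph_out.index(omg)
--             ph_out = ph_out[:omg_i] + "OMG" + ph_out[len(omg)+omg_i:]
--         elif asap in ph_out:
--             asap_i = ph_out.index(asap)
--             ph_out = ph_out[:asap_i] + "ASAP" + ph_out[len(asap)+asap_i:]
--
--     return ph_out
-- ===== SOURCE B (Python) =====
-- def re_phrases(up_out):
--     pairs = (("BY THE WAY", "BTW"), ("LAUGHING OUT LOUD", "LOL"),
--              ("OH MY GOD", "OMG"), ("AS SOON AS POSSIBLE", "ASAP"))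
--     out = []
--     i = 0
--     n = len(up_out)
--     while i < n:
--         for phrase, acr in pairs:
--             if up_out.startswith(phrase, i):
--                 out.append(acr)
--                 i += len(phrase)
--                 break
--         else:
--             out.append(up_out[i])
--             i += 1
--     return "".join(out)
-- ===== Notes on version B (the rewrite author's own statement) =====
-- stated objective: faster
-- what changed: A rescans the whole string len(s) times (an `in` search plus `.index` plus slicing per iteration, replacing one occurrence at a time); B makes a single left-to-right pass that emits the acronym wherever a phrase starts and the character otherwise, so every occurrence is replaced in one O(n) scan.
-- intended difference: On strings containing the 33-character overlap "LAUGHING OUT LOUDAUGHING OUT LOUD", A's substitution creates a fresh occurrence of the laughing-out-loud phrase spanning the inserted acronym and A replaces that too (on the witness A returns "LOLOL"), while B replaces only the occurrences present in the input (witness: "LOLAUGHING OUT LOUD"), the intended replace-all behaviour of str.replace/re.sub; A and B are proved to differ on every such string (re_phrases_tight). — e.g. on re_phrases("LAUGHING OUT LOUDAUGHING OUT LOUD"): A returns "LOLOL", B returns "LOLAUGHING OUT LOUD"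
import Mathlib
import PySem

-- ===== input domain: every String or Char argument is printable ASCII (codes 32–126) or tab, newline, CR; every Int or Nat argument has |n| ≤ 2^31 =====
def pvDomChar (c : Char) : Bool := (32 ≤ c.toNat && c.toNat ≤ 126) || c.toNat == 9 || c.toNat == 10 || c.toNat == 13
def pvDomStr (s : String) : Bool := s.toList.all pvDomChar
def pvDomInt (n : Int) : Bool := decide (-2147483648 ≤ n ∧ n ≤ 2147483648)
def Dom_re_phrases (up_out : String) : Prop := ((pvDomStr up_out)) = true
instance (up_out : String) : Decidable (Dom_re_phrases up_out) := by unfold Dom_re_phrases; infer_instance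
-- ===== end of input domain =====

-- B is a single left-to-right pass (one scan, no repeated `in`/`index` searches); it differs
-- from A only on strings where a replacement of A creates a NEW phrase occurrence (D_ below).

-- ===== PORT A =====
-- shared string literals of the Python source, as character lists
def pvBtw : List Char := ['B','Y',' ','T','H','E',' ','W','A','Y']
def pvLol : List Char := ['L','A','U','G','H','I','N','G',' ','O','U','T',' ','L','O','U','D']
def pvOmg : List Char := ['O','H',' ','M','Y',' ','G','O','D']
def pvAsap : List Char := ['A','S',' ','S','O','O','N',' ','A','S',' ','P','O','S','S','I','B','L','E']
def pvBtwA : List Char := ['B','T','W']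
def pvLolA : List Char := ['L','O','L']
def pvOmgA : List Char := ['O','M','G']
def pvAsapA : List Char := ['A','S','A','P']

-- one iteration of A's for-loop body; `ph_out.index(p)` is ported as PySem.Chars.find
-- (each index call is guarded by `p in ph_out`, so Python's .index never raises here)
def stepA (ph : List Char) : List Char :=
  if PySem.Chars.isIn pvBtw ph then
    PySem.List.slice ph none (some (PySem.Chars.find ph pvBtw)) ++ pvBtwA ++
      PySem.List.slice ph (some (PySem.Chars.len pvBtw + PySem.Chars.find ph pvBtw)) none
  else if PySem.Chars.isIn pvLol ph then
    PySem.List.slice ph none (some (PySem.Chars.find ph pvLol)) ++ pvLolA ++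
      PySem.List.slice ph (some (PySem.Chars.len pvLol + PySem.Chars.find ph pvLol)) none
  else if PySem.Chars.isIn pvOmg ph then
    PySem.List.slice ph none (some (PySem.Chars.find ph pvOmg)) ++ pvOmgA ++
      PySem.List.slice ph (some (PySem.Chars.len pvOmg + PySem.Chars.find ph pvOmg)) none
  else if PySem.Chars.isIn pvAsap ph then
    PySem.List.slice ph none (some (PySem.Chars.find ph pvAsap)) ++ pvAsapA ++
      PySem.List.slice ph (some (PySem.Chars.len pvAsap + PySem.Chars.find ph pvAsap)) none
  else ph

def re_phrases (up_out : String) : String :=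
  String.ofList
    ((PySem.List.pyRange 0 (PySem.Str.len up_out)).foldl (fun ph _ => stepA ph) up_out.toList)

-- ===== PORT B =====
-- single pass: at each position emit the acronym of the phrase starting there (if any) and
-- skip it, else emit the character (Source B's while-loop over the index i)
def scanBGo (fuel : Nat) (l : List Char) : List Char :=
  match fuel, l with
  | _, [] => []
  | 0, l => l  -- never reached: fuel starts at the string length and each step consumes ≥ 1 char
  | f + 1, c :: r =>
    if pvBtw.isPrefixOf (c :: r) then pvBtwA ++ scanBGo f ((c :: r).drop pvBtw.length)
    else if pvLol.isPrefixOf (c :: r) then pvLolA ++ scanBGo f ((c :: r).drop pvLol.length)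
    else if pvOmg.isPrefixOf (c :: r) then pvOmgA ++ scanBGo f ((c :: r).drop pvOmg.length)
    else if pvAsap.isPrefixOf (c :: r) then pvAsapA ++ scanBGo f ((c :: r).drop pvAsap.length)
    else c :: scanBGo f r

def scanB (l : List Char) : List Char := scanBGo l.length l

def re_phrases_alt (up_out : String) : String := String.ofList (scanB up_out.toList)

-- ===== PRECONDITION & SPEC =====
-- On strings containing the 33-character overlap "LAUGHING OUT LOUDAUGHING OUT LOUD", A's
-- substitution creates a fresh occurrence of the laughing-out-loud phrase spanning the inserted
-- acronym and A replaces that too, while B replaces only the occurrences present in the input —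
-- the intended replace-all behaviour (what str.replace/re.sub would produce).
def D_re_phrases (up_out : String) : Prop :=
  PySem.Str.isIn "LAUGHING OUT LOUDAUGHING OUT LOUD" up_out = true
instance (up_out : String) : Decidable (D_re_phrases up_out) := by unfold D_re_phrases; infer_instance

def Spec_re_phrases (up_out : String) (out : String) : Prop :=
  ¬ D_re_phrases up_out → out = re_phrases_alt up_out
instance (up_out : String) (out : String) : Decidable (Spec_re_phrases up_out out) := by
  unfold Spec_re_phrases; infer_instance

def pvDiffWitness_re_phrases : String := "LAUGHING OUT LOUDAUGHING OUT LOUD"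
def pvDiffWitnessOut_re_phrases : String × String := ("LOLOL", "LOLAUGHING OUT LOUD")

-- ===== CLAIM (what is proved, stated in full; the proofs are below) =====
def Claim_unchanged_re_phrases : Prop :=
  ∀ (up_out : String), Dom_re_phrases up_out → Spec_re_phrases up_out (re_phrases up_out)
def Claim_changed_re_phrases : Prop :=
  Dom_re_phrases (pvDiffWitness_re_phrases) ∧ D_re_phrases (pvDiffWitness_re_phrases) ∧
  re_phrases (pvDiffWitness_re_phrases) = pvDiffWitnessOut_re_phrases.1 ∧
  re_phrases_alt (pvDiffWitness_re_phrases) = pvDiffWitnessOut_re_phrases.2 ∧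
  pvDiffWitnessOut_re_phrases.1 ≠ pvDiffWitnessOut_re_phrases.2
def Claim_exact_re_phrases : Prop :=
  ∀ (up_out : String), Dom_re_phrases up_out → D_re_phrases up_out →
    re_phrases up_out ≠ re_phrases_alt up_out

-- ===== LEMMAS AND PROOFS =====

-- the second half of "LAUGHING OUT LOUD" missing its leading 'L'
def pvAug : List Char := ['A','U','G','H','I','N','G',' ','O','U','T',' ','L','O','U','D']
-- pvCascade = "LAUGHING OUT LOUDAUGHING OUT LOUD" : replacing its first 17 characters by "LOL"
-- creates a NEW occurrence of "LAUGHING OUT LOUD" spanning the inserted acronym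
def pvCascade : List Char := pvLol ++ pvAug

theorem cascade_eq : "LAUGHING OUT LOUDAUGHING OUT LOUD".toList = pvCascade := by decide

def pvPairs : List (List Char × List Char) :=
  [(pvBtw, pvBtwA), (pvLol, pvLolA), (pvOmg, pvOmgA), (pvAsap, pvAsapA)]
def pvPhr : List (List Char) := [pvBtw, pvLol, pvOmg, pvAsap]
def pvAcr : List (List Char) := [pvBtwA, pvLolA, pvOmgA, pvAsapA]

theorem prefSplit {q u v : List Char} (h : q <+: u ++ v) :
    q <+: u ∨ (u <+: q ∧ q.drop u.length <+: v) := by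
  rcases List.prefix_or_prefix_of_prefix h (u.prefix_append v) with h1 | h1
  · exact Or.inl h1
  · refine Or.inr ⟨h1, ?_⟩
    rw [List.prefix_append_drop h1] at h
    exact (List.prefix_append_right_inj u).mp h

-- no proper suffix of a phrase is prefix-compatible with any phrase or acronym
theorem fact_overlap : ∀ q ∈ pvPhr, ∀ x ∈ pvPhr ++ pvAcr, ∀ m ∈ List.range q.length,
    m ≠ 0 → ¬(q.drop m <+: x) ∧ ¬(x <+: q.drop m) := by decide

theorem scanBGo_nil (f : Nat) : scanBGo f [] = [] := by cases f <;> rfl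

theorem scanBGo_congr : ∀ (f : Nat) (g : Nat) (l : List Char), l.length ≤ f → l.length ≤ g →
    scanBGo f l = scanBGo g l := by
  intro f
  induction f with
  | zero =>
    intro g l hf _
    rw [List.length_eq_zero_iff.mp (Nat.le_zero.mp hf), scanBGo_nil, scanBGo_nil]
  | succ f ih =>
    intro g l hf hg
    match l with
    | [] => rw [scanBGo_nil, scanBGo_nil]
    | c :: r =>
      match g, hg with
      | g + 1, hg =>
        simp only [List.length_cons] at hf hg
        have hlen : ∀ q : List Char, 1 ≤ q.length → ((c :: r).drop q.length).length ≤ f ∧ ((c :: r).drop q.length).length ≤ g := by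
          intro q hq; simp only [List.length_drop, List.length_cons]; omega
        simp only [scanBGo]
        rw [ih g ((c :: r).drop pvBtw.length) (hlen _ (by decide)).1 (hlen _ (by decide)).2,
          ih g ((c :: r).drop pvLol.length) (hlen _ (by decide)).1 (hlen _ (by decide)).2,
          ih g ((c :: r).drop pvOmg.length) (hlen _ (by decide)).1 (hlen _ (by decide)).2,
          ih g ((c :: r).drop pvAsap.length) (hlen _ (by decide)).1 (hlen _ (by decide)).2,
          ih g r (by omega) (by omega)]

theorem scanB_nil : scanB [] = [] := by rfl

theorem scanB_cons (c : Char) (r : List Char) : scanB (c :: r) =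
    if pvBtw.isPrefixOf (c :: r) then pvBtwA ++ scanB ((c :: r).drop pvBtw.length)
    else if pvLol.isPrefixOf (c :: r) then pvLolA ++ scanB ((c :: r).drop pvLol.length)
    else if pvOmg.isPrefixOf (c :: r) then pvOmgA ++ scanB ((c :: r).drop pvOmg.length)
    else if pvAsap.isPrefixOf (c :: r) then pvAsapA ++ scanB ((c :: r).drop pvAsap.length)
    else c :: scanB r := by
  show scanBGo (r.length + 1) (c :: r) = _
  simp only [scanBGo]
  rw [scanBGo_congr r.length ((c :: r).drop pvBtw.length).length _ (by simp [pvBtw]) le_rfl,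
    scanBGo_congr r.length ((c :: r).drop pvLol.length).length _ (by simp [pvLol]) le_rfl,
    scanBGo_congr r.length ((c :: r).drop pvOmg.length).length _ (by simp [pvOmg]) le_rfl,
    scanBGo_congr r.length ((c :: r).drop pvAsap.length).length _ (by simp [pvAsap]) le_rfl]
  rfl

theorem head_no_ext {q x : List Char} (hq : q ∈ pvPhr) (hx : x ∈ pvPhr ++ pvAcr)
    {u v : List Char} (hu : u ≠ []) (h : q <+: u ++ (x ++ v)) : q <+: u := by
  rcases prefSplit h with h1 | ⟨h1, h2⟩
  · exact h1
  · rcases Nat.lt_or_ge u.length q.length with hlt | hge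
    · exfalso
      have hm0 : u.length ≠ 0 := by simpa [List.length_eq_zero_iff] using hu
      have hmem : u.length ∈ List.range q.length := List.mem_range.mpr hlt
      rcases prefSplit h2 with h3 | ⟨h3, _⟩
      · exact (fact_overlap q hq x hx u.length hmem hm0).1 h3
      · exact (fact_overlap q hq x hx u.length hmem hm0).2 h3
    · have : u = q := List.IsPrefix.eq_of_length h1 (Nat.le_antisymm h1.length_le hge)
      rw [this]

theorem cond_eq {q x : List Char} (hq : q ∈ pvPhr) (hx : x ∈ pvPhr ++ pvAcr)
    (c : Char) (u' v : List Char) :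
    q.isPrefixOf (c :: (u' ++ (x ++ v))) = q.isPrefixOf (c :: u') := by
  by_cases h : q <+: (c :: u')
  · have h2 : q <+: c :: (u' ++ (x ++ v)) := by
      have := h.trans (List.prefix_append (c :: u') (x ++ v))
      simpa using this
    rw [List.isPrefixOf_iff_prefix.mpr h2, List.isPrefixOf_iff_prefix.mpr h]
  · have h2 : ¬ q <+: c :: (u' ++ (x ++ v)) := by
      intro hc
      have hc' : q <+: (c :: u') ++ (x ++ v) := by simpa using hc
      exact h (head_no_ext hq hx (by simp) hc')
    have e1 : q.isPrefixOf (c :: (u' ++ (x ++ v))) = false := by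
      rw [Bool.eq_false_iff]
      exact fun hc => h2 (List.isPrefixOf_iff_prefix.mp hc)
    have e2 : q.isPrefixOf (c :: u') = false := by
      rw [Bool.eq_false_iff]
      exact fun hc => h (List.isPrefixOf_iff_prefix.mp hc)
    rw [e1, e2]

theorem scan_phr_btw (v : List Char) : scanB (pvBtw ++ v) = pvBtwA ++ scanB v := by
  simp only [pvBtw, List.cons_append, List.nil_append]
  rw [scanB_cons]
  simp [pvBtw, List.isPrefixOf]

theorem scan_phr_lol (v : List Char) : scanB (pvLol ++ v) = pvLolA ++ scanB v := by
  simp only [pvLol, List.cons_append, List.nil_append]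
  rw [scanB_cons]
  simp [pvBtw, pvLol, List.isPrefixOf]

theorem scan_phr_omg (v : List Char) : scanB (pvOmg ++ v) = pvOmgA ++ scanB v := by
  simp only [pvOmg, List.cons_append, List.nil_append]
  rw [scanB_cons]
  simp [pvBtw, pvLol, pvOmg, List.isPrefixOf]

theorem scan_phr_asap (v : List Char) : scanB (pvAsap ++ v) = pvAsapA ++ scanB v := by
  simp only [pvAsap, List.cons_append, List.nil_append]
  rw [scanB_cons]
  simp [pvBtw, pvLol, pvOmg, pvAsap, List.isPrefixOf]

theorem scan_acr_btw (v : List Char) : scanB (pvBtwA ++ v) = pvBtwA ++ scanB v := by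
  simp only [pvBtwA, List.cons_append, List.nil_append]
  rw [scanB_cons]
  simp only [pvBtw, pvLol, pvOmg, pvAsap, List.isPrefixOf]
  norm_num
  rw [scanB_cons]
  simp only [pvBtw, pvLol, pvOmg, pvAsap, List.isPrefixOf]
  norm_num
  rw [scanB_cons]
  simp [pvBtw, pvLol, pvOmg, pvAsap, List.isPrefixOf]

theorem scan_acr_omg (v : List Char) : scanB (pvOmgA ++ v) = pvOmgA ++ scanB v := by
  simp only [pvOmgA, List.cons_append, List.nil_append]
  rw [scanB_cons]
  simp only [pvBtw, pvLol, pvOmg, pvAsap, List.isPrefixOf]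
  norm_num
  rw [scanB_cons]
  simp only [pvBtw, pvLol, pvOmg, pvAsap, List.isPrefixOf]
  norm_num
  rw [scanB_cons]
  simp [pvBtw, pvLol, pvOmg, pvAsap, List.isPrefixOf]

theorem scan_acr_asap (v : List Char) : scanB (pvAsapA ++ v) = pvAsapA ++ scanB v := by
  simp only [pvAsapA, List.cons_append, List.nil_append]
  rw [scanB_cons]
  simp only [pvBtw, pvLol, pvOmg, pvAsap, List.isPrefixOf]
  norm_num
  rw [scanB_cons]
  simp only [pvBtw, pvLol, pvOmg, pvAsap, List.isPrefixOf]
  norm_num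
  rw [scanB_cons]
  simp only [pvBtw, pvLol, pvOmg, pvAsap, List.isPrefixOf]
  norm_num
  rw [scanB_cons]
  simp [pvBtw, pvLol, pvOmg, pvAsap, List.isPrefixOf]

theorem scan_acr_lol (v : List Char) (hv : ¬ pvAug <+: v) :
    scanB (pvLolA ++ v) = pvLolA ++ scanB v := by
  have hv' : pvAug.isPrefixOf v = false := by
    rw [Bool.eq_false_iff]
    exact fun hc => hv (List.isPrefixOf_iff_prefix.mp hc)
  simp only [pvAug] at hv'
  simp only [pvLolA, List.cons_append, List.nil_append]
  rw [scanB_cons]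
  simp only [pvBtw, pvLol, pvOmg, pvAsap, List.isPrefixOf]
  norm_num
  rw [scanB_cons]
  simp only [pvBtw, pvLol, pvOmg, pvAsap, List.isPrefixOf]
  norm_num
  rw [scanB_cons]
  simp [pvBtw, pvLol, pvOmg, pvAsap, List.isPrefixOf, hv']

theorem pairs_mem : ∀ pa ∈ pvPairs, pa.1 ∈ pvPhr ∧ pa.2 ∈ pvPhr ++ pvAcr := by decide

theorem suffix_append_infix {s t w : List Char} (h : s <:+ t) : s ++ w <:+: t ++ w := by
  obtain ⟨r, rfl⟩ := h
  exact ⟨r, [], by simp⟩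

theorem repl_nil (p a v : List Char) (hmem : (p, a) ∈ pvPairs)
    (hnc : ¬ pvCascade <:+: p ++ v) : scanB (p ++ v) = scanB (a ++ v) := by
  fin_cases hmem
  · rw [scan_phr_btw, scan_acr_btw]
  · have hv : ¬ pvAug <+: v := by
      intro hc
      exact hnc (((List.prefix_append_right_inj pvLol).mpr hc).isInfix)
    rw [scan_phr_lol, scan_acr_lol v hv]
  · rw [scan_phr_omg, scan_acr_omg]
  · rw [scan_phr_asap, scan_acr_asap]

theorem repl : ∀ (n : Nat) (u p a v : List Char), u.length ≤ n → (p, a) ∈ pvPairs →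
    ¬ pvCascade <:+: u ++ (p ++ v) → scanB (u ++ (p ++ v)) = scanB (u ++ (a ++ v)) := by
  intro n
  induction n with
  | zero =>
    intro u p a v hu hmem hnc
    rw [List.length_eq_zero_iff.mp (Nat.le_zero.mp hu)] at hnc ⊢
    exact repl_nil p a v hmem (by simpa using hnc)
  | succ n ih =>
    intro u p a v hu hmem hnc
    match u with
    | [] =>
      exact repl_nil p a v hmem (by simpa using hnc)
    | c :: u' =>
      have hpx : p ∈ pvPhr ++ pvAcr := List.mem_append_left _ (pairs_mem _ hmem).1
      have hax : a ∈ pvPhr ++ pvAcr := (pairs_mem _ hmem).2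
      simp only [List.cons_append] at hnc ⊢
      rw [scanB_cons, scanB_cons]
      rw [cond_eq (by decide : pvBtw ∈ pvPhr) hpx c u' v,
        cond_eq (by decide : pvBtw ∈ pvPhr) hax c u' v,
        cond_eq (by decide : pvLol ∈ pvPhr) hpx c u' v,
        cond_eq (by decide : pvLol ∈ pvPhr) hax c u' v,
        cond_eq (by decide : pvOmg ∈ pvPhr) hpx c u' v,
        cond_eq (by decide : pvOmg ∈ pvPhr) hax c u' v,
        cond_eq (by decide : pvAsap ∈ pvPhr) hpx c u' v,
        cond_eq (by decide : pvAsap ∈ pvPhr) hax c u' v]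
      have hlen : u'.length + 1 ≤ n + 1 := by simpa using hu
      have step : ∀ k : Nat, 1 ≤ k → k ≤ u'.length + 1 →
          scanB ((c :: (u' ++ (p ++ v))).drop k) = scanB ((c :: (u' ++ (a ++ v))).drop k) := by
        intro k hk1 hk2
        have e1 : (c :: (u' ++ (p ++ v))) = (c :: u') ++ (p ++ v) := by simp
        have e2 : (c :: (u' ++ (a ++ v))) = (c :: u') ++ (a ++ v) := by simp
        rw [e1, e2, List.drop_append_of_le_length (by simpa using hk2),
          List.drop_append_of_le_length (by simpa using hk2)]
        refine ih ((c :: u').drop k) p a v (by simp; omega) hmem ?_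
        intro hc
        refine hnc ?_
        have := hc.trans (suffix_append_infix (w := p ++ v) (List.drop_suffix k (c :: u')))
        simpa using this
      split_ifs with h1 h2 h3 h4
      · exact congrArg (pvBtwA ++ ·)
          (step pvBtw.length (by decide) (by simpa using (List.isPrefixOf_iff_prefix.mp h1).length_le))
      · exact congrArg (pvLolA ++ ·)
          (step pvLol.length (by decide) (by simpa using (List.isPrefixOf_iff_prefix.mp h2).length_le))
      · exact congrArg (pvOmgA ++ ·)
          (step pvOmg.length (by decide) (by simpa using (List.isPrefixOf_iff_prefix.mp h3).length_le))
      · exact congrArg (pvAsapA ++ ·)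
          (step pvAsap.length (by decide) (by simpa using (List.isPrefixOf_iff_prefix.mp h4).length_le))
      · exact congrArg (c :: ·)
          (ih u' p a v (by omega) hmem (fun hc => hnc (hc.trans ⟨[c], [], by simp⟩)))

-- no proper suffix of the cascade string is prefix-compatible with an acronym
theorem fact_cascade_mid : ∀ x ∈ pvAcr, ∀ m ∈ List.range 33, m ≠ 0 →
    ¬(pvCascade.drop m <+: x) ∧ ¬(x <+: pvCascade.drop m) := by decide

theorem no_pref_chunk {chunk v : List Char} (h : pvCascade <+: chunk ++ v)
    (h1 : ¬ pvCascade <+: chunk) (h2 : ¬ chunk <+: pvCascade) : False :=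
  (prefSplit h).elim h1 (fun hh => h2 hh.1)

theorem cascade_lol_tail {v : List Char} (h : pvCascade.drop 1 <+: v) :
    pvCascade <:+: pvLol ++ v := by
  have haug : pvAug <+: v := (by decide : pvAug <+: pvCascade.drop 1).trans h
  exact ((List.prefix_append_right_inj pvLol).mpr haug).isInfix

theorem cascade_transfer : ∀ (u p a v : List Char), (p, a) ∈ pvPairs →
    pvCascade <:+: u ++ (a ++ v) → pvCascade <:+: u ++ (p ++ v) := by
  intro u
  induction u with
  | nil =>
    intro p a v hmem h
    simp only [List.nil_append] at h ⊢
    fin_cases hmem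
    all_goals
      simp only [pvBtwA, pvLolA, pvOmgA, pvAsapA, List.cons_append, List.nil_append] at h
      rw [List.infix_cons_iff] at h
    -- BTW
    · rcases h with h | h
      · exact absurd h (fun hc => no_pref_chunk (by simpa using hc : pvCascade <+: ['B','T','W'] ++ v) (by decide) (by decide))
      rw [List.infix_cons_iff] at h
      rcases h with h | h
      · exact absurd h (fun hc => no_pref_chunk (by simpa using hc : pvCascade <+: ['T','W'] ++ v) (by decide) (by decide))
      rw [List.infix_cons_iff] at h
      rcases h with h | h
      · exact absurd h (fun hc => no_pref_chunk (by simpa using hc : pvCascade <+: ['W'] ++ v) (by decide) (by decide))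
      · exact h.trans (List.suffix_append pvBtw v).isInfix
    -- LOL
    · rcases h with h | h
      · exact absurd h (fun hc => no_pref_chunk (by simpa using hc : pvCascade <+: ['L','O','L'] ++ v) (by decide) (by decide))
      rw [List.infix_cons_iff] at h
      rcases h with h | h
      · exact absurd h (fun hc => no_pref_chunk (by simpa using hc : pvCascade <+: ['O','L'] ++ v) (by decide) (by decide))
      rw [List.infix_cons_iff] at h
      rcases h with h | h
      · have hc : pvCascade <+: ['L'] ++ v := by simpa using h
        rcases prefSplit hc with h' | ⟨_, h2⟩
        · exact absurd h' (by decide)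
        · exact cascade_lol_tail (by simpa using h2)
      · exact h.trans (List.suffix_append pvLol v).isInfix
    -- OMG
    · rcases h with h | h
      · exact absurd h (fun hc => no_pref_chunk (by simpa using hc : pvCascade <+: ['O','M','G'] ++ v) (by decide) (by decide))
      rw [List.infix_cons_iff] at h
      rcases h with h | h
      · exact absurd h (fun hc => no_pref_chunk (by simpa using hc : pvCascade <+: ['M','G'] ++ v) (by decide) (by decide))
      rw [List.infix_cons_iff] at h
      rcases h with h | h
      · exact absurd h (fun hc => no_pref_chunk (by simpa using hc : pvCascade <+: ['G'] ++ v) (by decide) (by decide))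
      · exact h.trans (List.suffix_append pvOmg v).isInfix
    -- ASAP
    · rcases h with h | h
      · exact absurd h (fun hc => no_pref_chunk (by simpa using hc : pvCascade <+: ['A','S','A','P'] ++ v) (by decide) (by decide))
      rw [List.infix_cons_iff] at h
      rcases h with h | h
      · exact absurd h (fun hc => no_pref_chunk (by simpa using hc : pvCascade <+: ['S','A','P'] ++ v) (by decide) (by decide))
      rw [List.infix_cons_iff] at h
      rcases h with h | h
      · exact absurd h (fun hc => no_pref_chunk (by simpa using hc : pvCascade <+: ['A','P'] ++ v) (by decide) (by decide))
      rw [List.infix_cons_iff] at h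
      rcases h with h | h
      · exact absurd h (fun hc => no_pref_chunk (by simpa using hc : pvCascade <+: ['P'] ++ v) (by decide) (by decide))
      · exact h.trans (List.suffix_append pvAsap v).isInfix
  | cons c u' ih =>
    intro p a v hmem h
    have ha : a ∈ pvAcr := by fin_cases hmem <;> decide
    simp only [List.cons_append] at h ⊢
    rw [List.infix_cons_iff] at h
    rcases h with h | h
    · -- pvCascade is a prefix of (c :: u') ++ (a ++ v)
      have h' : pvCascade <+: (c :: u') ++ (a ++ v) := by simpa using h
      rcases prefSplit h' with h1 | ⟨h1, h2⟩
      · have : pvCascade <+: (c :: u') ++ (p ++ v) := h1.trans (List.prefix_append _ _)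
        exact (by simpa using this.isInfix)
      · rcases Nat.lt_or_ge (c :: u').length 33 with hlt | hge
        · exfalso
          have hm0 : (c :: u').length ≠ 0 := by simp
          have hmem' : (c :: u').length ∈ List.range 33 := List.mem_range.mpr hlt
          rcases prefSplit h2 with h3 | ⟨h3, _⟩
          · exact (fact_cascade_mid a ha _ hmem' hm0).1 h3
          · exact (fact_cascade_mid a ha _ hmem' hm0).2 h3
        · have hcu : c :: u' = pvCascade :=
            List.IsPrefix.eq_of_length h1
              (Nat.le_antisymm h1.length_le (by simpa using (by decide : pvCascade.length = 33) ▸ hge))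
          have hpre : pvCascade <+: c :: u' := by rw [hcu]
          have : pvCascade <+: (c :: u') ++ (p ++ v) := hpre.trans (List.prefix_append _ _)
          exact (by simpa using this.isInfix)
    · exact (ih p a v hmem h).trans ⟨[c], [], by simp⟩

theorem pairs_len : ∀ pa ∈ pvPairs, pa.2.length + 6 ≤ pa.1.length := by decide

theorem find_decomp {p s : List Char} (hin : PySem.Chars.isIn p s = true) :
    s = s.take (PySem.Chars.find s p).toNat ++
      (p ++ s.drop ((PySem.Chars.find s p).toNat + p.length)) := by
  have h0 : 0 ≤ PySem.Chars.find s p :=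
    (PySem.Chars.find_nonneg_iff s p).mpr ((PySem.Chars.isIn_iff_infix p s).mp hin)
  have hpre : p <+: s.drop (PySem.Chars.find s p).toNat := (PySem.Chars.find_spec h0).1
  conv_lhs => rw [← List.take_append_drop (PySem.Chars.find s p).toNat s]
  rw [List.prefix_append_drop hpre, List.drop_drop]

theorem slice_decomp {p : List Char} (aA : List Char) {s : List Char}
    (hin : PySem.Chars.isIn p s = true) :
    PySem.List.slice s none (some (PySem.Chars.find s p)) ++ aA ++
      PySem.List.slice s (some (PySem.Chars.len p + PySem.Chars.find s p)) none
      = s.take (PySem.Chars.find s p).toNat ++ (aA ++ s.drop ((PySem.Chars.find s p).toNat + p.length)) := by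
  have h0 : 0 ≤ PySem.Chars.find s p :=
    (PySem.Chars.find_nonneg_iff s p).mpr ((PySem.Chars.isIn_iff_infix p s).mp hin)
  have hlp : PySem.Chars.len p = (p.length : Int) := by simp [PySem.Chars.len]
  rw [PySem.List.slice_to s h0, PySem.List.slice_from s (by omega : (0:Int) ≤ PySem.Chars.len p + PySem.Chars.find s p)]
  rw [show (PySem.Chars.len p + PySem.Chars.find s p).toNat = (PySem.Chars.find s p).toNat + p.length by omega]
  simp [List.append_assoc]

theorem stepA_cases (s : List Char) :
    (stepA s = s ∧ ∀ q ∈ pvPhr, ¬ q <:+: s) ∨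
    (∃ u p a v, (p, a) ∈ pvPairs ∧ s = u ++ (p ++ v) ∧ stepA s = u ++ (a ++ v)) := by
  unfold stepA
  by_cases hb : PySem.Chars.isIn pvBtw s = true
  · rw [if_pos hb]
    exact Or.inr ⟨_, pvBtw, pvBtwA, _, by decide, find_decomp hb, slice_decomp pvBtwA hb⟩
  rw [if_neg hb]
  by_cases hl : PySem.Chars.isIn pvLol s = true
  · rw [if_pos hl]
    exact Or.inr ⟨_, pvLol, pvLolA, _, by decide, find_decomp hl, slice_decomp pvLolA hl⟩
  rw [if_neg hl]
  by_cases ho : PySem.Chars.isIn pvOmg s = true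
  · rw [if_pos ho]
    exact Or.inr ⟨_, pvOmg, pvOmgA, _, by decide, find_decomp ho, slice_decomp pvOmgA ho⟩
  rw [if_neg ho]
  by_cases ha : PySem.Chars.isIn pvAsap s = true
  · rw [if_pos ha]
    exact Or.inr ⟨_, pvAsap, pvAsapA, _, by decide, find_decomp ha, slice_decomp pvAsapA ha⟩
  rw [if_neg ha]
  refine Or.inl ⟨rfl, ?_⟩
  intro q hq
  fin_cases hq
  · exact (PySem.Chars.isIn_eq_false_iff _ _).mp (Bool.eq_false_iff.mpr hb)
  · exact (PySem.Chars.isIn_eq_false_iff _ _).mp (Bool.eq_false_iff.mpr hl)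
  · exact (PySem.Chars.isIn_eq_false_iff _ _).mp (Bool.eq_false_iff.mpr ho)
  · exact (PySem.Chars.isIn_eq_false_iff _ _).mp (Bool.eq_false_iff.mpr ha)

theorem iter_preserve : ∀ (k : Nat) (s : List Char), ¬ pvCascade <:+: s →
    ¬ pvCascade <:+: stepA^[k] s ∧ scanB (stepA^[k] s) = scanB s := by
  intro k
  induction k with
  | zero => exact fun s h => ⟨h, rfl⟩
  | succ k ih =>
    intro s h
    rw [Function.iterate_succ_apply]
    rcases stepA_cases s with ⟨heq, _⟩ | ⟨u, p, a, v, hmem, hs, hstep⟩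
    · rw [heq]; exact ih s h
    · rw [hs] at h
      have h' : ¬ pvCascade <:+: stepA s := by
        rw [hstep]
        exact fun hc => h (cascade_transfer u p a v hmem hc)
      have hscan : scanB (stepA s) = scanB (u ++ (p ++ v)) := by
        rw [hstep]
        exact (repl u.length u p a v le_rfl hmem h).symm
      rcases ih (stepA s) h' with ⟨h1, h2⟩
      exact ⟨h1, by rw [h2, hscan, ← hs]⟩

theorem iter_fix : ∀ (k : Nat) (s : List Char), s.length ≤ 6 * k →
    ∀ q ∈ pvPhr, ¬ q <:+: stepA^[k] s := by
  intro k
  induction k with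
  | zero =>
    intro s hlen q hq hc
    have hs : s = [] := List.length_eq_zero_iff.mp (Nat.le_zero.mp (by simpa using hlen))
    rw [hs] at hc
    have hle := hc.length_le
    fin_cases hq <;> simp_all [pvBtw, pvLol, pvOmg, pvAsap]
  | succ k ih =>
    intro s hlen q hq
    rcases stepA_cases s with ⟨heq, hnophr⟩ | ⟨u, p, a, v, hmem, hs, hstep⟩
    · rw [Function.iterate_fixed heq]
      exact hnophr q hq
    · rw [Function.iterate_succ_apply]
      refine ih (stepA s) ?_ q hq
      have h1 := pairs_len _ hmem
      have h2 : s.length = u.length + p.length + v.length := by simp [hs]; ring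
      have h3 : (stepA s).length = u.length + a.length + v.length := by simp [hstep]; ring
      simp only at h1
      omega

theorem scan_nophrase : ∀ (s : List Char), (∀ q ∈ pvPhr, ¬ q <:+: s) → scanB s = s := by
  intro s
  induction s with
  | nil => exact fun _ => scanB_nil
  | cons c r ih =>
    intro h
    rw [scanB_cons]
    rw [if_neg (fun hc => h pvBtw (by decide) ((List.isPrefixOf_iff_prefix.mp hc).isInfix)),
      if_neg (fun hc => h pvLol (by decide) ((List.isPrefixOf_iff_prefix.mp hc).isInfix)),
      if_neg (fun hc => h pvOmg (by decide) ((List.isPrefixOf_iff_prefix.mp hc).isInfix)),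
      if_neg (fun hc => h pvAsap (by decide) ((List.isPrefixOf_iff_prefix.mp hc).isInfix))]
    exact congrArg (c :: ·) (ih (fun q hq hc => h q hq (hc.trans (List.suffix_cons c r).isInfix)))

theorem foldl_stepA {β : Type} : ∀ (l : List β) (s : List Char),
    l.foldl (fun ph _ => stepA ph) s = stepA^[l.length] s := by
  intro l
  induction l with
  | nil => intro s; rfl
  | cons x t ih =>
    intro s
    rw [List.foldl_cons, ih (stepA s), List.length_cons, Function.iterate_succ_apply]

theorem listMain (s : List Char) (h : ¬ pvCascade <:+: s) :
    (PySem.List.pyRange 0 ((s.length : Int))).foldl (fun ph _ => stepA ph) s = scanB s := by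
  rw [foldl_stepA]
  have hfree : ∀ q ∈ pvPhr, ¬ q <:+: stepA^[(PySem.List.pyRange 0 ((s.length : Int))).length] s := by
    apply iter_fix
    have : (PySem.List.pyRange 0 ((s.length : Int))).length = s.length := by
      rw [PySem.List.pyRange_zero_natCast]; simp
    omega
  have h2 := (iter_preserve (PySem.List.pyRange 0 ((s.length : Int))).length s h).2
  rw [← h2, scan_nophrase _ hfree]

-- no phrase can begin inside the 16-character window "AUGHING OUT LOUD", whatever follows
theorem fact_aug : ∀ q ∈ pvPhr, ∀ m ∈ List.range pvAug.length,
    ¬(q <+: pvAug.drop m) ∧ ¬(pvAug.drop m <+: q) := by decide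

theorem scan_aug : ∀ (w : List Char), scanB (pvAug ++ w) = pvAug ++ scanB w := by
  have key : ∀ (k m : Nat), pvAug.length - m = k → m < pvAug.length → ∀ w,
      scanB (pvAug.drop m ++ w) = pvAug.drop m ++ scanB w := by
    intro k
    induction k with
    | zero => intro m hm hlt; omega
    | succ k ih =>
      intro m hm hlt w
      have hcons : ∃ c r, pvAug.drop m = c :: r ∧ r = pvAug.drop (m + 1) := by
        rcases hd : pvAug.drop m with _ | ⟨c, r⟩
        · exfalso; have := congrArg List.length hd; simp at this; omega
        · refine ⟨c, r, rfl, ?_⟩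
          have := congrArg (List.drop 1) hd
          simp [List.drop_drop] at this
          exact this.symm
      rcases hcons with ⟨c, r, hd, hr⟩
      have hnof : ∀ q, q ∈ pvPhr → ¬ q <+: (c :: r) ++ w := by
        intro q hq hc
        rw [← hd] at hc
        rcases prefSplit hc with h1 | ⟨h1, _⟩
        · exact (fact_aug q hq m (List.mem_range.mpr hlt)).1 h1
        · exact (fact_aug q hq m (List.mem_range.mpr hlt)).2 h1
      rw [hd, List.cons_append, scanB_cons]
      rw [if_neg (fun hc => hnof pvBtw (by decide) (by simpa using List.isPrefixOf_iff_prefix.mp hc)),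
        if_neg (fun hc => hnof pvLol (by decide) (by simpa using List.isPrefixOf_iff_prefix.mp hc)),
        if_neg (fun hc => hnof pvOmg (by decide) (by simpa using List.isPrefixOf_iff_prefix.mp hc)),
        if_neg (fun hc => hnof pvAsap (by decide) (by simpa using List.isPrefixOf_iff_prefix.mp hc))]
      by_cases hlast : m + 1 < pvAug.length
      · have hstep := ih (m + 1) (by omega) hlast w
        rw [← hr] at hstep
        rw [hstep]
        simp
      · have hr0 : r = [] := by
          rw [hr, List.drop_eq_nil_iff]
          omega
        rw [hr0]
        simp
  intro w
  simpa using key pvAug.length 0 rfl (by decide) w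

theorem scanB_contains : ∀ (n : Nat) (s : List Char), s.length ≤ n →
    pvCascade <:+: s → pvLol <:+: scanB s := by
  intro n
  induction n with
  | zero =>
    intro s hn hc
    rw [List.length_eq_zero_iff.mp (Nat.le_zero.mp hn)] at hc
    have := hc.length_le
    simp [pvCascade, pvLol, pvAug] at this
  | succ n ih =>
    intro s hn hc
    by_cases hpre : pvCascade <+: s
    · obtain ⟨w, hw⟩ := hpre
      have hs : s = pvLol ++ (pvAug ++ w) := by rw [← hw]; simp [pvCascade]
      rw [hs, scan_phr_lol, scan_aug]
      refine ⟨['L', 'O'], scanB w, ?_⟩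
      simp [pvLolA, pvLol, pvAug]
    · match s, hn with
      | [], _ =>
        exfalso
        have := hc.length_le
        simp [pvCascade, pvLol, pvAug] at this
      | c :: r, hn =>
        obtain ⟨t1, t2, ht⟩ := hc
        rw [List.append_assoc] at ht
        have ht1 : t1 ≠ [] := by
          intro h0
          rw [h0] at ht
          exact hpre ⟨t2, by simpa using ht⟩
        have hCr : pvCascade <:+: r := by
          match t1, ht1 with
          | c' :: t1', _ =>
            refine ⟨t1', t2, ?_⟩
            have := congrArg List.tail ht
            simpa using this
        have main : ∀ (q : List Char), q ∈ pvPhr → q.isPrefixOf (c :: r) = true →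
            pvCascade <:+: (c :: r).drop q.length := by
          intro q hq hpq
          have hqpre := List.isPrefixOf_iff_prefix.mp hpq
          have hjge : q.length ≤ t1.length := by
            by_contra hcon
            have hlt : t1.length < q.length := Nat.lt_of_not_le hcon
            have hdropC : (c :: r).drop t1.length = pvCascade ++ t2 := by
              rw [← ht, List.drop_left]
            have hlol : pvLol <+: (c :: r).drop t1.length := by
              rw [hdropC]
              exact (by decide : pvLol <+: pvCascade).trans (List.prefix_append _ _)
            have hsplit := List.prefix_append_drop hqpre
            rw [hsplit, List.drop_append_of_le_length (le_of_lt hlt)] at hlol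
            have ht1pos : t1.length ≠ 0 := by simpa [List.length_eq_zero_iff] using ht1
            rcases prefSplit hlol with h1 | ⟨h1, _⟩
            · exact (fact_overlap q hq pvLol (by decide) t1.length (List.mem_range.mpr hlt) ht1pos).2 h1
            · exact (fact_overlap q hq pvLol (by decide) t1.length (List.mem_range.mpr hlt) ht1pos).1 h1
          refine ⟨t1.drop q.length, t2, ?_⟩
          have := congrArg (List.drop q.length) ht
          rw [List.drop_append_of_le_length hjge] at this
          rw [List.append_assoc]
          exact this
        have hlen : ∀ k : Nat, 1 ≤ k → ((c :: r).drop k).length ≤ n := by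
          intro k hk
          simp only [List.length_drop, List.length_cons]
          simp only [List.length_cons] at hn
          omega
        rw [scanB_cons]
        split_ifs with h1 h2 h3 h4
        · exact (ih _ (hlen _ (by decide)) (main pvBtw (by decide) h1)).trans ⟨pvBtwA, [], by simp⟩
        · exact (ih _ (hlen _ (by decide)) (main pvLol (by decide) h2)).trans ⟨pvLolA, [], by simp⟩
        · exact (ih _ (hlen _ (by decide)) (main pvOmg (by decide) h3)).trans ⟨pvOmgA, [], by simp⟩
        · exact (ih _ (hlen _ (by decide)) (main pvAsap (by decide) h4)).trans ⟨pvAsapA, [], by simp⟩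
        · exact (ih r (by simp only [List.length_cons] at hn; omega) hCr).trans ⟨[c], [], by simp⟩

-- ===== VERDICT (by name: the statement is the Claim_ definition above) =====
theorem re_phrases_spec : Claim_unchanged_re_phrases := by
  intro up_out _ hD
  rw [D_re_phrases, PySem.Str.isIn_iff_infix, cascade_eq] at hD
  unfold re_phrases re_phrases_alt
  rw [PySem.Str.len_eq]
  exact congrArg String.ofList (listMain up_out.toList hD)

set_option maxRecDepth 40000 in
theorem re_phrases_changed : Claim_changed_re_phrases := by
  unfold Claim_changed_re_phrases; decide

theorem re_phrases_tight : Claim_exact_re_phrases := by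
  intro up_out _ hD hEq
  rw [D_re_phrases, PySem.Str.isIn_iff_infix, cascade_eq] at hD
  have hlist : re_phrases up_out ≠ re_phrases_alt up_out := by
    intro hE
    have hl : (re_phrases up_out).toList = (re_phrases_alt up_out).toList := by rw [hE]
    unfold re_phrases re_phrases_alt at hl
    rw [PySem.Str.len_eq, String.toList_ofList, String.toList_ofList, foldl_stepA] at hl
    have hfree := iter_fix (PySem.List.pyRange 0 ((up_out.toList.length : Int))).length up_out.toList
      (by rw [PySem.List.pyRange_zero_natCast]; simp; omega) pvLol (by decide)
    have hcont := scanB_contains (up_out.toList.length) up_out.toList le_rfl hD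
    rw [← hl] at hcont
    exact hfree hcont
  exact hlist hEq
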